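-- pv_equiv track=rewrite | github.com/FArseny/dungeon_maze | test.py | getBitFence
-- ===== SOURCE A (Python) =====
-- def getBitFence(fence):
--         bf = []
--         for row in fence:
--             res = 0
--             power = 1
--             for val in reversed(row):
--                 res += power * val
--                 power *= 2
--             bf.append(res)
--         return bf
-- ===== SOURCE B (Python) =====
-- def getBitFence(fence):
--     # Recursive decomposition: tail-recursive Horner accumulator per row,
--     # structural recursion over the list of rows.
--     def rowval(row, acc=0):
--         if not row:
--             return acc
--         return rowval(row[1:], acc * 2 + row[0])
--
--     if not fence:
--         return []
--     return [rowval(fence[0])] + getBitFence(fence[1:])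
-- ===== Notes on version B (the rewrite author's own statement) =====
-- stated objective: alternative
-- what changed: Replaced the imperative reversed traversal with power-of-two multiples (res += power*val; power *= 2) by a structurally recursive decomposition: a tail-recursive forward Horner accumulator (acc = acc*2 + val) per row and recursion over the list of rows instead of a loop with append.
import Mathlib
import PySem

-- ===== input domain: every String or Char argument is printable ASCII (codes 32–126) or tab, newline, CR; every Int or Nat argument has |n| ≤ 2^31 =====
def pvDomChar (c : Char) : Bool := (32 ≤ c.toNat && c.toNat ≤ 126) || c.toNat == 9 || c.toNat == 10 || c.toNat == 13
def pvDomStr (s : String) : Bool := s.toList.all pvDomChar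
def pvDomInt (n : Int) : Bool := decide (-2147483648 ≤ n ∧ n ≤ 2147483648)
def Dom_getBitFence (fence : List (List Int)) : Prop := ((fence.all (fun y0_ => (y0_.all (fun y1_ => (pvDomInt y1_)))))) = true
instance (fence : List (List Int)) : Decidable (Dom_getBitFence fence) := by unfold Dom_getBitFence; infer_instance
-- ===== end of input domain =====

-- B replaces A's imperative reversed traversal with power-of-two multiples by a
-- structurally recursive decomposition (tail-recursive Horner accumulator per row,
-- recursion over rows); same cost, different structure.

-- ===== PORT A =====
-- inner loop of A: for val in reversed(row): res += power*val; power *= 2, state (res, power)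
def getBitFence (fence : List (List Int)) : List Int :=
  fence.foldl (fun bf row =>
    bf ++ [(row.reverse.foldl (fun (s : Int × Int) val => (s.1 + s.2 * val, s.2 * 2)) (0, 1)).1]) []

-- ===== PORT B =====
-- tail-recursive Horner accumulator of Source B's rowval
def pvRowVal : List Int → Int → Int
  | [], acc => acc
  | v :: r, acc => pvRowVal r (acc * 2 + v)

def getBitFence_alt : List (List Int) → List Int
  | [] => []
  | row :: rest => pvRowVal row 0 :: getBitFence_alt rest

-- ===== PRECONDITION & SPEC =====
def Spec_getBitFence (fence : List (List Int)) (out : List Int) : Prop := out = getBitFence_alt fence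
instance (fence : List (List Int)) (out : List Int) : Decidable (Spec_getBitFence fence out) := by unfold Spec_getBitFence; infer_instance

-- ===== CLAIM =====
def Claim_equal_getBitFence : Prop := ∀ (fence : List (List Int)), Dom_getBitFence fence → Spec_getBitFence fence (getBitFence fence)

-- ===== LEMMAS AND PROOFS =====

theorem pvRowVal_append (xs : List Int) (v acc : Int) :
    pvRowVal (xs ++ [v]) acc = pvRowVal xs acc * 2 + v := by
  induction xs generalizing acc with
  | nil => rfl
  | cons x xs ih => simp [pvRowVal, ih]

-- A's inner reversed loop computes the Horner value of the row.
theorem pvA_inner (l : List Int) (res power : Int) :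
    (l.foldl (fun (s : Int × Int) val => (s.1 + s.2 * val, s.2 * 2)) (res, power)).1
      = res + power * pvRowVal l.reverse 0 := by
  induction l generalizing res power with
  | nil => simp [pvRowVal]
  | cons v l ih =>
      simp only [List.foldl_cons, List.reverse_cons, pvRowVal_append, ih]
      ring

theorem pvRow_eq (row : List Int) :
    (row.reverse.foldl (fun (s : Int × Int) val => (s.1 + s.2 * val, s.2 * 2)) (0, 1)).1
      = pvRowVal row 0 := by
  have h := pvA_inner row.reverse 0 1
  simpa using h

theorem pvFoldHorner (fence : List (List Int)) (bf : List Int) :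
    fence.foldl (fun bf row => bf ++ [pvRowVal row 0]) bf = bf ++ getBitFence_alt fence := by
  induction fence generalizing bf with
  | nil => simp [getBitFence_alt]
  | cons row fs ih =>
      simp only [List.foldl_cons]
      rw [ih]
      simp [getBitFence_alt]

-- ===== VERDICT =====
theorem getBitFence_spec : Claim_equal_getBitFence := by
  intro fence _
  unfold Spec_getBitFence getBitFence
  simp only [pvRow_eq]
  simpa using pvFoldHorner fence []
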